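-- pv_equiv track=rewrite | github.com/Intellimint/north-fox-digital | sbs_sales_agent/offers/generator.py | _light_findings_line
-- ===== SOURCE A (Python) =====
-- def _select_light_findings(light_findings: list[dict[str, str]] | None, *, max_items: int = 2) -> list[dict[str, str]]:
--     if not light_findings:
--         return []
--     sev_rank = {"critical": 4, "high": 3, "medium": 2, "low": 1}
--     uniq: dict[str, dict[str, str]] = {}
--     for row in light_findings:
--         title = str(row.get("title") or "").strip()
--         if not title:
--             continue
--         sev = str(row.get("severity") or "medium").lower()
--         key = title.lower()
--         prev = uniq.get(key)
--         if prev is None or sev_rank.get(sev, 0) > sev_rank.get(str(prev.get("severity") or "").lower(), 0):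
--             uniq[key] = {
--                 "title": title,
--                 "severity": sev,
--                 "category": str(row.get("category") or ""),
--             }
--     rows = sorted(
--         list(uniq.values()),
--         key=lambda r: sev_rank.get(str(r.get("severity") or "").lower(), 0),
--         reverse=True,
--     )
--     return rows[:max_items]
--
-- def _light_findings_line(light_findings: list[dict[str, str]] | None) -> str:
--     def _translate_owner_risk(finding: dict[str, str]) -> str:
--         title = str(finding.get("title") or "").lower()
--         category = str(finding.get("category") or "").lower()
--         if any(k in title for k in ("dmarc", "spf", "dkim", "email auth")) or category == "email_auth":
--             return "your domain can be easier to spoof, which can hurt trust and inbox placement"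
--         if "security header" in title or category == "security":
--             return "basic website security protections look incomplete"
--         if "https" in title or "tls" in title or "certificate" in title:
--             return "parts of the site may look less secure to visitors and browsers"
--         if "noindex" in title or category == "seo":
--             return "important pages may be harder for Google to index and rank"
--         if "no h1" in title or "title" in title or "meta description" in title:
--             return "search engines may struggle to understand what your core pages are about"
--         if category == "ada" or "accessibility" in title:
--             return "some visitors can hit avoidable accessibility blockers on key pages"
--         if category == "conversion" or "cta" in title or "form" in title:
--             return "contact flow friction may be costing you qualified leads"
--         pretty = str(finding.get("title") or "").strip()
--         return f"there are visible website issues that likely impact trust and lead flow ({pretty[:70]})"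
--
--     picks = _select_light_findings(light_findings)
--     if not picks:
--         return ""
--     if len(picks) == 1:
--         return f"Quick heads up: I noticed {_translate_owner_risk(picks[0])}."
--     return (
--         f"Quick heads up: I noticed {_translate_owner_risk(picks[0])}, and {_translate_owner_risk(picks[1])}."
--     )
-- ===== SOURCE B (Python) =====
-- _SEV_RANK = {"critical": 4, "high": 3, "medium": 2, "low": 1}
--
-- # (keywords to look for in the lowered title, category that also triggers the rule, message)
-- _RISK_RULES = [
--     (("dmarc", "spf", "dkim", "email auth"), "email_auth",
--      "your domain can be easier to spoof, which can hurt trust and inbox placement"),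
--     (("security header",), "security",
--      "basic website security protections look incomplete"),
--     (("https", "tls", "certificate"), None,
--      "parts of the site may look less secure to visitors and browsers"),
--     (("noindex",), "seo",
--      "important pages may be harder for Google to index and rank"),
--     (("no h1", "title", "meta description"), None,
--      "search engines may struggle to understand what your core pages are about"),
--     (("accessibility",), "ada",
--      "some visitors can hit avoidable accessibility blockers on key pages"),
--     (("cta", "form"), "conversion",
--      "contact flow friction may be costing you qualified leads"),
-- ]
--
--
-- def _owner_risk(title: str, category: str) -> str:
--     t = title.lower()
--     c = category.lower()
--     for keywords, cat, message in _RISK_RULES: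
--         if any(k in t for k in keywords) or (cat is not None and c == cat):
--             return message
--     return f"there are visible website issues that likely impact trust and lead flow ({title.strip()[:70]})"
--
--
-- def _light_findings_line(light_findings):
--     if not light_findings:
--         return ""
--     # dedup by lowered title, keeping the highest-severity row; value = (rank, title, category)
--     uniq = {}
--     for row in light_findings:
--         title = str(row.get("title") or "").strip()
--         if not title:
--             continue
--         sev = str(row.get("severity") or "medium").lower()
--         rank = _SEV_RANK.get(sev, 0)
--         key = title.lower()
--         if key not in uniq or rank > uniq[key][0]:
--             uniq[key] = (rank, title, str(row.get("category") or ""))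
--     # one linear pass: top two by rank, ties kept in first-seen order (= stable sort desc)
--     best = second = None
--     for entry in uniq.values():
--         if best is None or entry[0] > best[0]:
--             best, second = entry, best
--         elif second is None or entry[0] > second[0]:
--             second = entry
--     if best is None:
--         return ""
--     head = _owner_risk(best[1], best[2])
--     if second is None:
--         return f"Quick heads up: I noticed {head}."
--     return f"Quick heads up: I noticed {head}, and {_owner_risk(second[1], second[2])}."
-- ===== Notes on version B (the rewrite author's own statement) =====
-- stated objective: alternative
-- what changed: B replaces A's sort-then-slice selection of the top-2 findings with a single linear pass that keeps the best two by severity rank (ties in first-seen order), and replaces the hard-coded if/elif translation chain with a scan over a rule table of (keywords, category, message).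
import Mathlib
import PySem

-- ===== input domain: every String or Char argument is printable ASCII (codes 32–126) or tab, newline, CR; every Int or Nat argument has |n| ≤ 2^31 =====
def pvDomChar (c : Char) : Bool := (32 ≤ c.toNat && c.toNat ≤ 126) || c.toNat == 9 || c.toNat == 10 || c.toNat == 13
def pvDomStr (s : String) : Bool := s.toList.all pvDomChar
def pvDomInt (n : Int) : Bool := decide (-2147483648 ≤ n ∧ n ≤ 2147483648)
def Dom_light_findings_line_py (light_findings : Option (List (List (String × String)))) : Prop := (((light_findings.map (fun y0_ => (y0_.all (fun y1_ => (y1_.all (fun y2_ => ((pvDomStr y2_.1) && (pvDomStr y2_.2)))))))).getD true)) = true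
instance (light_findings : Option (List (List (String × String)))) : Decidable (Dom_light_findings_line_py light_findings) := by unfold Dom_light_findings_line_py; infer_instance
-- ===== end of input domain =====

-- B replaces A's sort-then-slice top-2 selection by a single linear pass keeping the best two
-- findings, and the if-chain risk translator by a scan over a rule table (objective: alternative).

-- `x or d` on strings/None: falsy (None / "") falls back to d
def pvOr (o : Option String) (d : String) : String :=
  match o with
  | none => d
  | some s => if s = "" then d else s

-- ===== PORT A =====
def pvSevRankA : PySem.Dict String Int :=
  PySem.Dict.mk [("critical", 4), ("high", 3), ("medium", 2), ("low", 1)]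

-- sev_rank.get(s, 0)
def pvRankA (s : String) : Int := PySem.Dict.getD pvSevRankA s 0

-- one iteration of the dedup loop in _select_light_findings
def pvSelectStepA (uniq : PySem.Dict String (PySem.Dict String String))
    (row : List (String × String)) : PySem.Dict String (PySem.Dict String String) :=
  let rowd : PySem.Dict String String := PySem.Dict.mk row
  let title := PySem.Str.strip (pvOr (rowd.get? "title") "")
  if title = "" then uniq
  else
    let sev := PySem.Str.lower (pvOr (rowd.get? "severity") "medium")
    let key := PySem.Str.lower title
    let newv : PySem.Dict String String :=
      PySem.Dict.mk [("title", title), ("severity", sev), ("category", pvOr (rowd.get? "category") "")]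
    match uniq.get? key with
    | none => uniq.insert key newv
    | some prev =>
        if pvRankA sev > pvRankA (PySem.Str.lower (pvOr (prev.get? "severity") "")) then
          uniq.insert key newv
        else uniq

-- the sort key lambda
def pvKeyA (r : PySem.Dict String String) : Int :=
  pvRankA (PySem.Str.lower (pvOr (r.get? "severity") ""))

-- _select_light_findings
def pvSelectA (light_findings : Option (List (List (String × String)))) (max_items : Int) :
    List (PySem.Dict String String) :=
  match light_findings with
  | none => []
  | some rows =>
    if rows = [] then []
    else
      let uniq := rows.foldl pvSelectStepA PySem.Dict.empty
      let sortedRows := PySem.List.sorted uniq.values pvKeyA true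
      PySem.List.slice sortedRows none (some max_items)

-- _translate_owner_risk
def pvTranslateA (finding : PySem.Dict String String) : String :=
  let title := PySem.Str.lower (pvOr (finding.get? "title") "")
  let category := PySem.Str.lower (pvOr (finding.get? "category") "")
  if (["dmarc", "spf", "dkim", "email auth"].any fun k => PySem.Str.isIn k title) || category == "email_auth" then
    "your domain can be easier to spoof, which can hurt trust and inbox placement"
  else if PySem.Str.isIn "security header" title || category == "security" then
    "basic website security protections look incomplete"
  else if PySem.Str.isIn "https" title || PySem.Str.isIn "tls" title || PySem.Str.isIn "certificate" title then
    "parts of the site may look less secure to visitors and browsers"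
  else if PySem.Str.isIn "noindex" title || category == "seo" then
    "important pages may be harder for Google to index and rank"
  else if PySem.Str.isIn "no h1" title || PySem.Str.isIn "title" title || PySem.Str.isIn "meta description" title then
    "search engines may struggle to understand what your core pages are about"
  else if category == "ada" || PySem.Str.isIn "accessibility" title then
    "some visitors can hit avoidable accessibility blockers on key pages"
  else if category == "conversion" || PySem.Str.isIn "cta" title || PySem.Str.isIn "form" title then
    "contact flow friction may be costing you qualified leads"
  else
    let pretty := PySem.Str.strip (pvOr (finding.get? "title") "")
    "there are visible website issues that likely impact trust and lead flow (" ++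
      PySem.Str.slice pretty none (some 70) ++ ")"

def light_findings_line_py (light_findings : Option (List (List (String × String)))) : String :=
  let picks := pvSelectA light_findings 2
  match picks with
  | [] => ""
  | [p] => "Quick heads up: I noticed " ++ pvTranslateA p ++ "."
  | p0 :: p1 :: _ =>
      "Quick heads up: I noticed " ++ pvTranslateA p0 ++ ", and " ++ pvTranslateA p1 ++ "."

-- ===== PORT B =====
def pvSevRankB : PySem.Dict String Int :=
  PySem.Dict.mk [("critical", 4), ("high", 3), ("medium", 2), ("low", 1)]

def pvRankB (s : String) : Int := PySem.Dict.getD pvSevRankB s 0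

-- _RISK_RULES: (keywords in lowered title, optional category, message)
def pvRules : List (List String × Option String × String) :=
  [ (["dmarc", "spf", "dkim", "email auth"], some "email_auth",
     "your domain can be easier to spoof, which can hurt trust and inbox placement"),
    (["security header"], some "security",
     "basic website security protections look incomplete"),
    (["https", "tls", "certificate"], none,
     "parts of the site may look less secure to visitors and browsers"),
    (["noindex"], some "seo",
     "important pages may be harder for Google to index and rank"),
    (["no h1", "title", "meta description"], none,
     "search engines may struggle to understand what your core pages are about"),
    (["accessibility"], some "ada",
     "some visitors can hit avoidable accessibility blockers on key pages"),
    (["cta", "form"], some "conversion",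
     "contact flow friction may be costing you qualified leads") ]

-- the `for keywords, cat, message in _RISK_RULES` loop of _owner_risk
def pvRiskGo (t c title : String) : List (List String × Option String × String) → String
  | [] =>
      "there are visible website issues that likely impact trust and lead flow (" ++
        PySem.Str.slice (PySem.Str.strip title) none (some 70) ++ ")"
  | (kws, cat?, msg) :: rest =>
      if (kws.any fun k => PySem.Str.isIn k t) ||
          (match cat? with | some cat => c == cat | none => false) then msg
      else pvRiskGo t c title rest

def pvOwnerRisk (title category : String) : String :=
  pvRiskGo (PySem.Str.lower title) (PySem.Str.lower category) title pvRules

-- one iteration of B's dedup loop; value = (rank, title, category)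
def pvDedupStepB (uniq : PySem.Dict String (Int × String × String))
    (row : List (String × String)) : PySem.Dict String (Int × String × String) :=
  let rowd : PySem.Dict String String := PySem.Dict.mk row
  let title := PySem.Str.strip (pvOr (rowd.get? "title") "")
  if title = "" then uniq
  else
    let sev := PySem.Str.lower (pvOr (rowd.get? "severity") "medium")
    let rank := pvRankB sev
    let key := PySem.Str.lower title
    -- `key not in uniq or rank > uniq[key][0]` (the getD default is never
    -- the decider: when the key is absent the left disjunct already holds)
    if uniq.contains key = false || rank > (uniq.getD key (0, "", "")).1 then
      uniq.insert key (rank, title, pvOr (rowd.get? "category") "")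
    else uniq

-- one iteration of B's best/second pass
def pvBestStep (st : Option (Int × String × String) × Option (Int × String × String))
    (e : Int × String × String) :
    Option (Int × String × String) × Option (Int × String × String) :=
  match st with
  | (none, _) => (some e, none)
  | (some b, s) =>
      if e.1 > b.1 then (some e, some b)
      else
        match s with
        | none => (some b, some e)
        | some s' => if e.1 > s'.1 then (some b, some e) else (some b, some s')

def light_findings_line_py_alt (light_findings : Option (List (List (String × String)))) : String :=
  match light_findings with
  | none => ""
  | some rows =>
    if rows = [] then ""
    else
      let uniq := rows.foldl pvDedupStepB PySem.Dict.empty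
      match uniq.values.foldl pvBestStep (none, none) with
      | (none, _) => ""
      | (some b, none) => "Quick heads up: I noticed " ++ pvOwnerRisk b.2.1 b.2.2 ++ "."
      | (some b, some s) =>
          "Quick heads up: I noticed " ++ pvOwnerRisk b.2.1 b.2.2 ++ ", and " ++
            pvOwnerRisk s.2.1 s.2.2 ++ "."

-- ===== PRECONDITION & SPEC =====
def Spec_light_findings_line_py (light_findings : Option (List (List (String × String)))) (out : String) : Prop := out = light_findings_line_py_alt light_findings
instance (light_findings : Option (List (List (String × String)))) (out : String) : Decidable (Spec_light_findings_line_py light_findings out) := by unfold Spec_light_findings_line_py; infer_instance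

-- ===== CLAIM (what is proved, stated in full; the proofs are below) =====
def Claim_equal_light_findings_line_py : Prop := ∀ (light_findings : Option (List (List (String × String)))), Dom_light_findings_line_py light_findings → Spec_light_findings_line_py light_findings (light_findings_line_py light_findings)

-- ===== LEMMAS AND PROOFS =====

theorem pvOr_some_empty (s : String) : pvOr (some s) "" = s := by
  show (if s = "" then "" else s) = s
  split_ifs with h
  · exact h.symm
  · rfl

theorem lowerChar_idem (c : Char) :
    PySem.Chars.lowerChar (PySem.Chars.lowerChar c) = PySem.Chars.lowerChar c := by
  simp only [PySem.Chars.lowerChar, PySem.Chars.isupper]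
  split_ifs with h1 h2
  · simp only [Bool.and_eq_true, decide_eq_true_eq] at h1 h2
    obtain ⟨a1, b1⟩ := h1
    obtain ⟨a2, b2⟩ := h2
    have ha : c.toNat ≥ 65 := a1
    have hb : c.toNat ≤ 90 := b1
    have hv : (c.toNat + 32).isValidChar := Or.inl (by omega)
    have ht : (Char.ofNat (c.toNat + 32)).toNat = c.toNat + 32 := by
      rw [Char.toNat_ofNat]; simp [hv]
    have : (Char.ofNat (c.toNat + 32)).toNat ≤ 90 := b2
    omega
  · rfl
  · rfl

theorem lower_idem (s : String) : PySem.Str.lower (PySem.Str.lower s) = PySem.Str.lower s := by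
  simp only [PySem.Str.lower, PySem.Chars.lower]
  congr 1
  simp [List.map_map, Function.comp, lowerChar_idem]

-- B's stored triple, expressed from A's stored dict value
def pvPhi (v : PySem.Dict String String) : Int × String × String :=
  (pvKeyA v, pvOr (v.get? "title") "", pvOr (v.get? "category") "")

theorem get?_mk_map {ν ν' : Type} (f : ν → ν') (l : List (String × ν)) (k : String) :
    (PySem.Dict.mk (l.map (fun p => (p.1, f p.2)))).get? k = ((PySem.Dict.mk l).get? k).map f := by
  induction l with
  | nil => rfl
  | cons p rest ih =>
    obtain ⟨k1, v1⟩ := p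
    rw [List.map_cons, PySem.Dict.get?_mk_cons, PySem.Dict.get?_mk_cons]
    by_cases hk : (k1 == k) = true
    · simp [hk]
    · simp only [hk]
      exact ih

theorem get?_rel {ν ν' : Type} (f : ν → ν') (dA : PySem.Dict String ν)
    (dB : PySem.Dict String ν') (h : dB.items = dA.items.map (fun p => (p.1, f p.2)))
    (k : String) : dB.get? k = (dA.get? k).map f := by
  obtain ⟨lB⟩ := dB
  obtain ⟨lA⟩ := dA
  simp only at h
  subst h
  exact get?_mk_map f lA k

theorem contains_rel {ν ν' : Type} (f : ν → ν') (dA : PySem.Dict String ν)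
    (dB : PySem.Dict String ν') (h : dB.items = dA.items.map (fun p => (p.1, f p.2)))
    (k : String) : dB.contains k = dA.contains k := by
  simp [PySem.Dict.contains, h, List.any_map, Function.comp_def]

theorem items_insert_map {ν ν' : Type} (f : ν → ν') (dA : PySem.Dict String ν)
    (dB : PySem.Dict String ν') (h : dB.items = dA.items.map (fun p => (p.1, f p.2)))
    (k : String) (v : ν) :
    (dB.insert k (f v)).items = ((dA.insert k v).items.map (fun p => (p.1, f p.2))) := by
  have hc : dB.contains k = dA.contains k := contains_rel f dA dB h k
  simp only [PySem.Dict.insert, hc]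
  split_ifs with hk
  · simp only [h, List.map_map]
    apply List.map_congr_left
    intro p _
    by_cases hp : (p.1 == k) = true <;> simp [hp, Function.comp]
  · simp [h]

theorem pvPhi_mk (title x cat : String) :
    pvPhi (PySem.Dict.mk [("title", title), ("severity", PySem.Str.lower x), ("category", cat)]) =
      (pvRankB (PySem.Str.lower x), title, cat) := by
  have h1 : (PySem.Dict.mk [("title", title), ("severity", PySem.Str.lower x), ("category", cat)]).get? "title" = some title := by
    simp [PySem.Dict.get?_mk_cons]
  have h2 : (PySem.Dict.mk [("title", title), ("severity", PySem.Str.lower x), ("category", cat)]).get? "severity" = some (PySem.Str.lower x) := by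
    simp [PySem.Dict.get?_mk_cons]
  have h3 : (PySem.Dict.mk [("title", title), ("severity", PySem.Str.lower x), ("category", cat)]).get? "category" = some cat := by
    simp [PySem.Dict.get?_mk_cons]
  simp only [pvPhi, pvKeyA, h1, h2, h3, pvOr_some_empty, lower_idem]
  rfl

-- the dedup-loop invariant: B's dict is A's dict with values mapped through pvPhi
theorem dedup_step_rel (dA : PySem.Dict String (PySem.Dict String String))
    (dB : PySem.Dict String (Int × String × String))
    (h : dB.items = dA.items.map (fun p => (p.1, pvPhi p.2))) (row : List (String × String)) :
    (pvDedupStepB dB row).items = ((pvSelectStepA dA row).items.map (fun p => (p.1, pvPhi p.2))) := by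
  simp only [pvDedupStepB, pvSelectStepA]
  by_cases ht : PySem.Str.strip (pvOr ((PySem.Dict.mk row).get? "title") "") = ""
  · rw [if_pos ht, if_pos ht]
    exact h
  · rw [if_neg ht, if_neg ht]
    have hget := get?_rel pvPhi dA dB h
      (PySem.Str.lower (PySem.Str.strip (pvOr ((PySem.Dict.mk row).get? "title") "")))
    have hcont := contains_rel pvPhi dA dB h
      (PySem.Str.lower (PySem.Str.strip (pvOr ((PySem.Dict.mk row).get? "title") "")))
    have hphi := pvPhi_mk (PySem.Str.strip (pvOr ((PySem.Dict.mk row).get? "title") ""))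
      (pvOr ((PySem.Dict.mk row).get? "severity") "medium")
      (pvOr ((PySem.Dict.mk row).get? "category") "")
    cases hA : dA.get? (PySem.Str.lower (PySem.Str.strip (pvOr ((PySem.Dict.mk row).get? "title") ""))) with
    | none =>
      have hcA : dA.contains (PySem.Str.lower (PySem.Str.strip (pvOr ((PySem.Dict.mk row).get? "title") ""))) = false := by
        rw [PySem.Dict.contains_eq_isSome_get?, hA]; rfl
      have hcB := hcont.trans hcA
      have hcond : (decide (dB.contains (PySem.Str.lower (PySem.Str.strip (pvOr ((PySem.Dict.mk row).get? "title") ""))) = false) ||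
          decide (pvRankB (PySem.Str.lower (pvOr ((PySem.Dict.mk row).get? "severity") "medium")) >
            (dB.getD (PySem.Str.lower (PySem.Str.strip (pvOr ((PySem.Dict.mk row).get? "title") ""))) (0, "", "")).1)) = true := by
        rw [hcB]; simp
      rw [if_pos hcond]
      rw [← hphi]
      exact items_insert_map pvPhi dA dB h _ _
    | some prev =>
      have hgB : dB.get? (PySem.Str.lower (PySem.Str.strip (pvOr ((PySem.Dict.mk row).get? "title") ""))) = some (pvPhi prev) := by
        rw [hget, hA]; rfl
      have hcB : dB.contains (PySem.Str.lower (PySem.Str.strip (pvOr ((PySem.Dict.mk row).get? "title") ""))) = true := by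
        rw [PySem.Dict.contains_eq_isSome_get?, hgB]; rfl
      have hgD : (dB.getD (PySem.Str.lower (PySem.Str.strip (pvOr ((PySem.Dict.mk row).get? "title") ""))) (0, "", "")).1 = pvKeyA prev := by
        simp [PySem.Dict.getD, hgB, pvPhi]
      simp only [hA]
      by_cases hcmp : pvRankA (PySem.Str.lower (pvOr ((PySem.Dict.mk row).get? "severity") "medium")) >
          pvRankA (PySem.Str.lower (pvOr (prev.get? "severity") ""))
      · rw [if_pos hcmp]
        have hcmpB : pvRankB (PySem.Str.lower (pvOr ((PySem.Dict.mk row).get? "severity") "medium")) >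
            (dB.getD (PySem.Str.lower (PySem.Str.strip (pvOr ((PySem.Dict.mk row).get? "title") ""))) (0, "", "")).1 := by
          rw [hgD]
          exact hcmp
        have hcond : (decide (dB.contains (PySem.Str.lower (PySem.Str.strip (pvOr ((PySem.Dict.mk row).get? "title") ""))) = false) ||
            decide (pvRankB (PySem.Str.lower (pvOr ((PySem.Dict.mk row).get? "severity") "medium")) >
              (dB.getD (PySem.Str.lower (PySem.Str.strip (pvOr ((PySem.Dict.mk row).get? "title") ""))) (0, "", "")).1)) = true := by
          simp [hcmpB]
        rw [if_pos hcond]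
        rw [← hphi]
        exact items_insert_map pvPhi dA dB h _ _
      · rw [if_neg hcmp]
        have hcmpB : ¬ (pvRankB (PySem.Str.lower (pvOr ((PySem.Dict.mk row).get? "severity") "medium")) >
            (dB.getD (PySem.Str.lower (PySem.Str.strip (pvOr ((PySem.Dict.mk row).get? "title") ""))) (0, "", "")).1) := by
          rw [hgD]
          exact hcmp
        have hcond : ¬ ((decide (dB.contains (PySem.Str.lower (PySem.Str.strip (pvOr ((PySem.Dict.mk row).get? "title") ""))) = false) ||
            decide (pvRankB (PySem.Str.lower (pvOr ((PySem.Dict.mk row).get? "severity") "medium")) >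
              (dB.getD (PySem.Str.lower (PySem.Str.strip (pvOr ((PySem.Dict.mk row).get? "title") ""))) (0, "", "")).1)) = true) := by
          rw [hcB]
          simp [hcmpB]
        rw [if_neg hcond]
        exact h

theorem dedup_rel (rows : List (List (String × String))) :
    (rows.foldl pvDedupStepB PySem.Dict.empty).items =
      ((rows.foldl pvSelectStepA PySem.Dict.empty).items.map (fun p => (p.1, pvPhi p.2))) := by
  suffices H : ∀ (dA : PySem.Dict String (PySem.Dict String String))
      (dB : PySem.Dict String (Int × String × String)),
      dB.items = dA.items.map (fun p => (p.1, pvPhi p.2)) →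
      (rows.foldl pvDedupStepB dB).items =
        (rows.foldl pvSelectStepA dA).items.map (fun p => (p.1, pvPhi p.2)) by
    exact H PySem.Dict.empty PySem.Dict.empty rfl
  induction rows with
  | nil => intro dA dB h; exact h
  | cons r rest ih =>
    intro dA dB h
    exact ih (pvSelectStepA dA r) (pvDedupStepB dB r) (dedup_step_rel dA dB h r)

-- first two elements of a list, as the (best, second) pair
def pvFirstTwo {α : Type} (l : List α) : Option α × Option α :=
  match l with
  | [] => (none, none)
  | [a] => (some a, none)
  | a :: b :: _ => (some a, some b)

-- B's best/second step, re-expressed on A's values through the sort key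
def pvStep2 {α : Type} (key : α → Int) (st : Option α × Option α) (v : α) :
    Option α × Option α :=
  match st with
  | (none, _) => (some v, none)
  | (some b, s) =>
      if key v > key b then (some v, some b)
      else
        match s with
        | none => (some b, some v)
        | some s' => if key v > key s' then (some b, some v) else (some b, some s')

theorem insertBy_nil {α : Type} (bef : α → α → Bool) (x : α) :
    PySem.List.insertBy bef x [] = [x] := rfl

theorem insertBy_cons {α : Type} (bef : α → α → Bool) (x y : α) (ys : List α) :
    PySem.List.insertBy bef x (y :: ys) =
      if bef x y then x :: y :: ys else y :: PySem.List.insertBy bef x ys := rfl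

theorem firstTwo_insertBy {α : Type} (key : α → Int) (x : α) (acc : List α) :
    pvFirstTwo (PySem.List.insertBy (fun a b => decide (key b < key a)) x acc) =
      pvStep2 key (pvFirstTwo acc) x := by
  match acc with
  | [] => rfl
  | [a] =>
    rw [insertBy_cons]
    by_cases hc : key a < key x
    · simp [hc, pvFirstTwo, pvStep2]
    · simp [hc, pvFirstTwo, pvStep2, insertBy_nil]
  | a :: b :: rest =>
    rw [insertBy_cons]
    by_cases hc : key a < key x
    · simp [hc, pvFirstTwo, pvStep2]
    · rw [insertBy_cons]
      by_cases hc2 : key b < key x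
      · simp [hc, hc2, pvFirstTwo, pvStep2]
      · simp [hc, hc2, pvFirstTwo, pvStep2]

theorem firstTwo_foldl_insertBy {α : Type} (key : α → Int) (vs : List α) (acc : List α) :
    pvFirstTwo (vs.foldl (fun acc x => PySem.List.insertBy (fun a b => decide (key b < key a)) x acc) acc) =
      vs.foldl (pvStep2 key) (pvFirstTwo acc) := by
  induction vs generalizing acc with
  | nil => rfl
  | cons v rest ih =>
    simp only [List.foldl_cons]
    rw [ih, firstTwo_insertBy]

theorem firstTwo_sorted {α : Type} (key : α → Int) (vs : List α) :
    pvFirstTwo (PySem.List.sorted vs key true) = vs.foldl (pvStep2 key) (none, none) := by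
  rw [PySem.List.sorted_rev_eq_foldl_insertBy]
  exact firstTwo_foldl_insertBy key vs []

theorem bestStep_map (st : Option (PySem.Dict String String) × Option (PySem.Dict String String))
    (v : PySem.Dict String String) :
    pvBestStep (st.1.map pvPhi, st.2.map pvPhi) (pvPhi v) =
      ((pvStep2 pvKeyA st v).1.map pvPhi, (pvStep2 pvKeyA st v).2.map pvPhi) := by
  obtain ⟨b?, s?⟩ := st
  cases b? with
  | none => rfl
  | some b =>
    have hv : (pvPhi v).1 = pvKeyA v := rfl
    have hb : (pvPhi b).1 = pvKeyA b := rfl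
    simp only [pvBestStep, pvStep2, Option.map_some, hv, hb]
    by_cases hc : pvKeyA v > pvKeyA b
    · simp [hc]
    · simp only [hc, if_false]
      cases s? with
      | none => rfl
      | some s' =>
        have hs : (pvPhi s').1 = pvKeyA s' := rfl
        simp only [Option.map_some, hs]
        by_cases hc2 : pvKeyA v > pvKeyA s'
        · simp [hc2]
        · simp [hc2]

theorem foldl_best_map (vs : List (PySem.Dict String String))
    (st : Option (PySem.Dict String String) × Option (PySem.Dict String String)) :
    (vs.map pvPhi).foldl pvBestStep (st.1.map pvPhi, st.2.map pvPhi) =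
      ((vs.foldl (pvStep2 pvKeyA) st).1.map pvPhi, (vs.foldl (pvStep2 pvKeyA) st).2.map pvPhi) := by
  induction vs generalizing st with
  | nil => rfl
  | cons v rest ih =>
    simp only [List.map_cons, List.foldl_cons]
    rw [bestStep_map, ih]

theorem translate_eq (v : PySem.Dict String String) :
    pvTranslateA v = pvOwnerRisk (pvOr (v.get? "title") "") (pvOr (v.get? "category") "") := by
  simp only [pvTranslateA, pvOwnerRisk, pvRules, pvRiskGo, List.any_cons, List.any_nil,
    Bool.or_false]
  split_ifs <;> simp_all

theorem slice_two {α : Type} (l : List α) :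
    PySem.List.slice l none (some 2) = l.take 2 := by
  have h : ((2 : Nat) : Int) = (2 : Int) := by norm_num
  rw [← h, PySem.List.slice_to_natCast]

theorem values_rel (rows : List (List (String × String))) :
    (rows.foldl pvDedupStepB PySem.Dict.empty).values =
      ((rows.foldl pvSelectStepA PySem.Dict.empty).values.map pvPhi) := by
  simp [PySem.Dict.values, dedup_rel rows, List.map_map, Function.comp_def]

-- ===== VERDICT (by name: the statement is the Claim_ definition above) =====
theorem light_findings_line_py_spec : Claim_equal_light_findings_line_py := by
  intro light_findings _
  unfold Spec_light_findings_line_py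
  cases light_findings with
  | none => rfl
  | some rows =>
    by_cases hr : rows = []
    · simp [light_findings_line_py, light_findings_line_py_alt, pvSelectA, hr]
    · simp only [light_findings_line_py, light_findings_line_py_alt, pvSelectA, hr, if_false]
      have hvals := values_rel rows
      have hfold :
          ((rows.foldl pvDedupStepB PySem.Dict.empty).values).foldl pvBestStep (none, none) =
            ((pvFirstTwo (PySem.List.sorted ((rows.foldl pvSelectStepA PySem.Dict.empty).values) pvKeyA true)).1.map pvPhi,
             (pvFirstTwo (PySem.List.sorted ((rows.foldl pvSelectStepA PySem.Dict.empty).values) pvKeyA true)).2.map pvPhi) := by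
        rw [hvals]
        have := foldl_best_map ((rows.foldl pvSelectStepA PySem.Dict.empty).values) (none, none)
        simp only [Option.map_none] at this
        rw [this, firstTwo_sorted]
      rw [hfold, slice_two]
      cases hs : PySem.List.sorted ((rows.foldl pvSelectStepA PySem.Dict.empty).values) pvKeyA true with
      | nil => rfl
      | cons v0 tail =>
        cases tail with
        | nil =>
          simp only [pvFirstTwo, List.take, Option.map_some, Option.map_none]
          rw [translate_eq v0]
          rfl
        | cons v1 rest =>
          simp only [pvFirstTwo, List.take, Option.map_some]
          rw [translate_eq v0, translate_eq v1]
          rfl
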